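-- pv_equiv track=rewrite | github.com/yz4004/leetcodeCollection | a_cf/灵茶每日/0225_增量法统计子数组.py | solve
-- ===== SOURCE A (Python) =====
-- from collections import defaultdict
--
-- def solve(nums):
--     # 增量法，考虑当前i结尾的子数组所有计数之和，相比与i-1]结尾子数组的增量
--     left = defaultdict(lambda :-1)
--     res = pre = 0
--     for i,x in enumerate(nums):
--         # left[x]+1, i
--         pre += i - left[x]
--         res += pre
--         left[x] = i
--     return res
-- ===== SOURCE B (Python) =====
-- def solve(nums):
--     # Two staged passes: first group the indices of each value, then sum each
--     # group's closed-form contributions (i - prev) * (n - i); no running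
--     # prefix sum is maintained.
--     n = len(nums)
--     pos = {}
--     for i, x in enumerate(nums):
--         pos.setdefault(x, []).append(i)
--     res = 0
--     for idxs in pos.values():
--         prev = -1
--         for i in idxs:
--             res += (i - prev) * (n - i)
--             prev = i
--     return res
-- ===== Notes on version B (the rewrite author's own statement) =====
-- stated objective: alternative
-- what changed: Replaces A's single pass with a running prefix accumulator (pre summed into res each step) by two staged passes: first group each value's indices in a dict, then sum per-group closed-form contributions (i - prev) * (n - i); no running prefix sum exists in B.
import Mathlib
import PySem

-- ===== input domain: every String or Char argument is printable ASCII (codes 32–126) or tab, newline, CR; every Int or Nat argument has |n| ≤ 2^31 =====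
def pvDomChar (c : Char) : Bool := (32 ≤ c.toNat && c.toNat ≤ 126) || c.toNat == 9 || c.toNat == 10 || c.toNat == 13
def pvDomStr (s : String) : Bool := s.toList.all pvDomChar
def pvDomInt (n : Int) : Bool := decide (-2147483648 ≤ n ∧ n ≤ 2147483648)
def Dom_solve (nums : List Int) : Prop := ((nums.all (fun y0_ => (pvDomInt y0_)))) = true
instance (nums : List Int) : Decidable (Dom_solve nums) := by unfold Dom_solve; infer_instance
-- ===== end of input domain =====

-- B replaces A's single pass with its running prefix accumulator by two staged
-- passes: group the indices of each value, then sum per-group closed-form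
-- contributions (i - prev) * (n - i); same O(n) cost, different decomposition.

-- ===== PORT A =====
-- loop body of A: state (left, res, pre); pre += i - left[x]; res += pre; left[x] = i
def solveStep (s : PySem.Dict Int Int × Int × Int) (p : Int × Int) :
    PySem.Dict Int Int × Int × Int :=
  let pre := s.2.2 + (p.1 - s.1.getD p.2 (-1))
  (s.1.insert p.2 p.1, s.2.1 + pre, pre)

def solve (nums : List Int) : Int :=
  ((PySem.List.enumerate nums 0).foldl solveStep (PySem.Dict.empty, 0, 0)).2.1

-- ===== PORT B =====
-- pass 1 of B: pos.setdefault(x, []).append(i)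
def buildPos (nums : List Int) : PySem.Dict Int (List Int) :=
  (PySem.List.enumerate nums 0).foldl
    (fun d p => d.modify p.2 [] (fun L => L ++ [p.1])) PySem.Dict.empty

-- inner loop of B's pass 2: res += (i - prev) * (n - i); prev = i
def groupStep (n : Int) (s : Int × Int) (i : Int) : Int × Int :=
  (s.1 + (i - s.2) * (n - i), i)

def solve_alt (nums : List Int) : Int :=
  let n : Int := nums.length
  ((buildPos nums).values).foldl
    (fun res idxs => (idxs.foldl (groupStep n) (res, -1)).1) 0

-- ===== PRECONDITION & SPEC =====
def Spec_solve (nums : List Int) (out : Int) : Prop := out = solve_alt nums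
instance (nums : List Int) (out : Int) : Decidable (Spec_solve nums out) := by unfold Spec_solve; infer_instance

-- ===== CLAIM (what is proved, stated in full; the proofs are below) =====
def Claim_equal_solve : Prop := ∀ (nums : List Int), Dom_solve nums → Spec_solve nums (solve nums)

-- ===== LEMMAS AND PROOFS =====

-- per-element dict fold with weight (n - i): the common middle ground of the proof
def midStep (n : Int) (s : PySem.Dict Int Int × Int) (p : Int × Int) :
    PySem.Dict Int Int × Int :=
  (s.1.insert p.2 p.1, s.2 + (p.1 - s.1.getD p.2 (-1)) * (n - p.1))

-- a group's contribution, started from 0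
def gsum (n : Int) (L : List Int) : Int := (L.foldl (groupStep n) (0, -1)).1

-- A's running-prefix loop equals the weighted per-element loop, provided n is
-- the index just past the end of the remaining list l.
lemma solve_loop_eq (n : Int) (l : List Int) : ∀ (i : Int) (d : PySem.Dict Int Int)
    (res pre : Int), n = i + l.length →
    ((PySem.List.enumerate l i).foldl solveStep (d, res, pre)).2.1
      = ((PySem.List.enumerate l i).foldl (midStep n) (d, res + pre * l.length)).2 := by
  induction l with
  | nil => intro i d res pre _; simp [PySem.List.enumerate_nil]
  | cons x t ih =>
    intro i d res pre h
    rw [PySem.List.enumerate_cons, List.foldl_cons, List.foldl_cons]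
    have h' : n = (i + 1) + (t.length : Int) := by
      simp at h; omega
    simp only [solveStep, midStep]
    rw [ih (i + 1) (d.insert x i)
        (res + (pre + (i - d.getD x (-1)))) (pre + (i - d.getD x (-1))) h']
    have harith :
        res + (pre + (i - d.getD x (-1))) + (pre + (i - d.getD x (-1))) * (t.length : Int)
          = res + pre * ((x :: t).length : Int) + (i - d.getD x (-1)) * (n - i) := by
      have hn : n - i = (t.length : Int) + 1 := by omega
      simp only [List.length_cons, hn]
      push_cast
      ring
    rw [harith]

lemma enumerate_append_singleton (t : List Int) (x : Int) : ∀ s : Int,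
    PySem.List.enumerate (t ++ [x]) s = PySem.List.enumerate t s ++ [(s + t.length, x)] := by
  induction t with
  | nil => intro s; simp [PySem.List.enumerate_cons, PySem.List.enumerate_nil]
  | cons y u ih =>
    intro s
    simp only [List.cons_append, PySem.List.enumerate_cons, ih (s + 1), List.cons.injEq,
      List.append_cancel_left_eq, List.cons.injEq, List.length_cons]
    refine ⟨trivial, ?_, trivial⟩
    simp only [Prod.mk.injEq]
    exact ⟨by push_cast; ring, trivial⟩

-- the inner fold's first component is affine in its start, second is independent
lemma groupStep_fst_shift (n : Int) (L : List Int) : ∀ (c p : Int),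
    (L.foldl (groupStep n) (c, p)).1 = c + (L.foldl (groupStep n) (0, p)).1 := by
  induction L with
  | nil => intro c p; simp
  | cons i t ih =>
    intro c p
    simp only [List.foldl_cons, groupStep]
    rw [ih (c + (i - p) * (n - i)), ih (0 + (i - p) * (n - i))]
    ring

lemma groupStep_snd (n : Int) (L : List Int) : ∀ (c p : Int),
    (L.foldl (groupStep n) (c, p)).2 = L.getLast?.getD p := by
  induction L with
  | nil => intro c p; simp
  | cons i t ih =>
    intro c p
    simp only [List.foldl_cons, groupStep]
    rcases t with _ | ⟨j, u⟩
    · simp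
    · rw [ih]
      cases h : (j :: u).getLast? with
      | none => rw [List.getLast?_eq_none_iff] at h; cases h
      | some a => simp [h]

lemma gsum_append (n : Int) (L : List Int) (i : Int) :
    gsum n (L ++ [i]) = gsum n L + (i - L.getLast?.getD (-1)) * (n - i) := by
  unfold gsum
  rw [List.foldl_append, List.foldl_cons, List.foldl_nil]
  have h2 := groupStep_snd n L 0 (-1)
  rcases hfold : L.foldl (groupStep n) ((0 : Int), (-1 : Int)) with ⟨a, b⟩
  simp only [groupStep]
  rw [hfold] at h2
  simp at h2
  rw [h2]

-- summing a map over a nodup list after changing it at one member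
lemma sum_map_update (ks : List Int) (y : Int) (f f' : Int → Int) :
    ks.Nodup → y ∈ ks → (∀ k ∈ ks, k ≠ y → f' k = f k) →
    (ks.map f').sum = (ks.map f).sum + (f' y - f y) := by
  induction ks with
  | nil => intro _ h; cases h
  | cons k t ih =>
    intro hnd hmem hoff
    rcases List.mem_cons.mp hmem with rfl | hy
    · have : ∀ k' ∈ t, f' k' = f k' := by
        intro k' hk'
        exact hoff k' (List.mem_cons_of_mem _ hk') (fun he => (List.nodup_cons.mp hnd).1 (he ▸ hk'))
      simp only [List.map_cons, List.sum_cons, List.map_congr_left this]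
      ring
    · have hk : f' k = f k :=
        hoff k List.mem_cons_self (fun he => (List.nodup_cons.mp hnd).1 (he ▸ hy))
      simp only [List.map_cons, List.sum_cons, hk,
        ih (List.nodup_cons.mp hnd).2 hy (fun k' h' hne => hoff k' (List.mem_cons_of_mem _ h') hne)]
      ring

-- B's outer fold threads res additively through the groups
lemma outer_fold_sum (n : Int) (vs : List (List Int)) : ∀ c : Int,
    vs.foldl (fun res idxs => (idxs.foldl (groupStep n) (res, -1)).1) c
      = c + (vs.map (gsum n)).sum := by
  induction vs with
  | nil => intro c; simp
  | cons L t ih =>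
    intro c
    simp only [List.foldl_cons, List.map_cons, List.sum_cons, ih]
    rw [groupStep_fst_shift]
    unfold gsum
    ring

-- the key lemmas characterising pass 1 + pass 2 against the weighted loop,
-- by induction from the right over the scanned prefix
lemma pos_keys_nodup (l : List Int) : (buildPos l).keys.Nodup := by
  unfold buildPos
  exact PySem.Dict.nodup_keys_foldl_modify_key (PySem.List.enumerate l 0)
    (fun p => p.2) [] (fun _ p L => L ++ [p.1]) PySem.Dict.empty (by simp)

lemma buildPos_append (t : List Int) (x : Int) :
    buildPos (t ++ [x])
      = (buildPos t).modify x [] (fun L => L ++ [(t.length : Int)]) := by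
  unfold buildPos
  rw [enumerate_append_singleton, List.foldl_append]
  simp

lemma main_invariant (n : Int) (l : List Int) :
    ((buildPos l).keys.map (fun k => gsum n ((buildPos l).getD k []))).sum
        = ((PySem.List.enumerate l 0).foldl (midStep n) (PySem.Dict.empty, 0)).2
    ∧ ∀ x, ((PySem.List.enumerate l 0).foldl (midStep n) (PySem.Dict.empty, 0)).1.getD x (-1)
        = (((buildPos l).getD x []).getLast?).getD (-1) := by
  induction l using List.reverseRecOn with
  | nil =>
    constructor
    · simp [buildPos, PySem.List.enumerate_nil]
    · intro x; simp [buildPos, PySem.List.enumerate_nil]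
  | append_singleton t x ih =>
    obtain ⟨ih1, ih2⟩ := ih
    have hE : PySem.List.enumerate (t ++ [x]) 0
        = PySem.List.enumerate t 0 ++ [((t.length : Int), x)] := by
      simpa using enumerate_append_singleton t x 0
    set M := (PySem.List.enumerate t 0).foldl (midStep n) (PySem.Dict.empty, 0) with hM
    have hfold : (PySem.List.enumerate (t ++ [x]) 0).foldl (midStep n) (PySem.Dict.empty, 0)
        = midStep n M ((t.length : Int), x) := by
      rw [hE, List.foldl_append, List.foldl_cons, List.foldl_nil]
    rw [hfold, buildPos_append]
    set P := buildPos t with hP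
    set i : Int := (t.length : Int) with hi
    constructor
    · -- the grouped sum gains exactly the new element's weighted contribution
      by_cases hc : P.contains x = true
      · have hkeys : (P.modify x [] (fun L => L ++ [i])).keys = P.keys := by
          rw [PySem.Dict.keys_modify]
          exact PySem.Dict.keys_insert_of_contains P _ hc
        rw [hkeys]
        have hmem : x ∈ P.keys := (PySem.Dict.contains_iff_mem_keys P x).mp hc
        rw [sum_map_update P.keys x
              (fun k => gsum n (P.getD k []))
              (fun k => gsum n ((P.modify x [] (fun L => L ++ [i])).getD k []))
              (pos_keys_nodup t) hmem ?hoff]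
        case hoff =>
          intro k _ hk
          simp only [PySem.Dict.getD_modify, if_neg hk]
        have hx : (P.modify x [] (fun L => L ++ [i])).getD x [] = P.getD x [] ++ [i] := by
          rw [PySem.Dict.getD_modify]; simp
        rw [ih1, hx, gsum_append]
        simp only [midStep]
        rw [ih2 x]
        ring
      · have hc' : P.contains x = false := by simpa using hc
        have hkeys : (P.modify x [] (fun L => L ++ [i])).keys = P.keys ++ [x] := by
          rw [PySem.Dict.keys_modify]
          exact PySem.Dict.keys_insert_of_not_contains P _ hc'
        have hnew : (P.modify x [] (fun L => L ++ [i])).getD x [] = [i] := by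
          rw [PySem.Dict.getD_modify]
          simp [PySem.Dict.getD_of_not_contains P ([] : List Int) hc']
        have hold : ∀ k ∈ P.keys, (P.modify x [] (fun L => L ++ [i])).getD k []
            = P.getD k [] := by
          intro k hk
          rw [PySem.Dict.getD_modify]
          have hkx : k ≠ x := by
            intro he; subst he
            rw [(PySem.Dict.contains_iff_mem_keys P k).mpr hk] at hc'
            cases hc'
          simp [hkx]
        rw [hkeys, List.map_append, List.sum_append,
            List.map_congr_left (fun k hk => congrArg (gsum n) (hold k hk)), ih1]
        simp only [List.map_cons, List.map_nil, List.sum_cons, List.sum_nil, hnew]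
        simp only [midStep]
        rw [ih2 x, PySem.Dict.getD_of_not_contains P ([] : List Int) hc']
        simp [gsum, groupStep]
    · intro y
      simp only [midStep, PySem.Dict.getD_insert, PySem.Dict.getD_modify]
      by_cases hy : y = x
      · simp [hy]
      · simp only [if_neg hy]
        exact ih2 y

-- ===== VERDICT (by name: the statement is the Claim_ definition above) =====
theorem solve_spec : Claim_equal_solve := by
  intro nums _
  unfold Spec_solve
  have hA : solve nums
      = ((PySem.List.enumerate nums 0).foldl (midStep (nums.length : Int)) (PySem.Dict.empty, 0)).2 := by
    unfold solve
    have := solve_loop_eq (nums.length : Int) nums 0 PySem.Dict.empty 0 0 (by simp)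
    simpa using this
  have hB : solve_alt nums
      = ((buildPos nums).keys.map (fun k => gsum (nums.length : Int) ((buildPos nums).getD k []))).sum := by
    unfold solve_alt
    rw [outer_fold_sum]
    rw [PySem.Dict.values_eq_map_keys _ (pos_keys_nodup nums) []]
    simp [List.map_map, Function.comp_def]
  rw [hA, hB, (main_invariant (nums.length : Int) nums).1]
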